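-- pv_equiv track=rewrite | github.com/RitamDey/Everything | python/CP/URI/1383.py | valid_squares
-- ===== SOURCE A (Python) =====
-- def valid_squares(matrix):
--     sum1, sum2, sum3 = 0, 0, 0
--
--     for i in range(0, 7, 3):
--         for row in matrix[i:i+3]:
--             sum1 += sum(row[0:3])
--             sum2 += sum(row[3:6])
--             sum3 += sum(row[6:9])
--
--     if sum1 != 135 or sum2 != 135 or sum3 != 135:
--         return False
--
--     return True
-- ===== SOURCE B (Python) =====
-- def valid_squares(matrix):
--     def band_sum(k):
--         return sum(sum(row[3 * k:3 * k + 3]) for row in matrix[:9])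
--     return all(band_sum(k) == 135 for k in range(3))
-- ===== Notes on version B (the rewrite author's own statement) =====
-- stated objective: alternative
-- what changed: Instead of A's single row-major pass that accumulates three scalar sums simultaneously, B works band-by-band: for each k in range(3) it makes a separate pass over matrix[:9] summing just that band's slice, and combines the three checks with a short-circuiting all(), so it can stop after the first failing band.
import Mathlib
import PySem

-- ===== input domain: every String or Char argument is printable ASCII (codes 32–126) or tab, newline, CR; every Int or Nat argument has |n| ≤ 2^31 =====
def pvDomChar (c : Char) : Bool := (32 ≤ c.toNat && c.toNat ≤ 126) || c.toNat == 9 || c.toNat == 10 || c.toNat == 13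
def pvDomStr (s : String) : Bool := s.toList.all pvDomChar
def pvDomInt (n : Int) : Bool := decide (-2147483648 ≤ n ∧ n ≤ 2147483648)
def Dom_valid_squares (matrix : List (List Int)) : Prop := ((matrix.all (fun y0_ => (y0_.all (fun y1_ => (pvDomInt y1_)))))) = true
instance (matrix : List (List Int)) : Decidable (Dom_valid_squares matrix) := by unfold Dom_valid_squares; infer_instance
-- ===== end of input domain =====

-- B replaces A's single row-major pass accumulating three scalars by band-by-band staged passes
-- (one pass over matrix[:9] per band k, combined with a short-circuiting all) — alternative decomposition, same cost.

-- ===== PORT A =====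
def valid_squares (matrix : List (List Int)) : Bool :=
  let s := (PySem.List.pyRange 0 7 3).foldl (fun (s : Int × Int × Int) i =>
    (PySem.List.slice matrix (some i) (some (i+3))).foldl (fun (s : Int × Int × Int) row =>
      (s.1 + (PySem.List.slice row (some 0) (some 3)).sum,
       s.2.1 + (PySem.List.slice row (some 3) (some 6)).sum,
       s.2.2 + (PySem.List.slice row (some 6) (some 9)).sum)) s) (0, 0, 0)
  if s.1 ≠ 135 ∨ s.2.1 ≠ 135 ∨ s.2.2 ≠ 135 then false else true

-- ===== PORT B =====
def valid_squares_alt (matrix : List (List Int)) : Bool :=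
  (PySem.List.pyRange 0 3 1).all (fun k =>
    ((PySem.List.slice matrix none (some 9)).map
        (fun row => (PySem.List.slice row (some (3*k)) (some (3*k+3))).sum)).sum == 135)

-- ===== PRECONDITION & SPEC =====
def Spec_valid_squares (matrix : List (List Int)) (out : Bool) : Prop := out = valid_squares_alt matrix
instance (matrix : List (List Int)) (out : Bool) : Decidable (Spec_valid_squares matrix out) := by unfold Spec_valid_squares; infer_instance

-- ===== CLAIM (what is proved, stated in full; the proofs are below) =====
def Claim_equal_valid_squares : Prop := ∀ (matrix : List (List Int)), Dom_valid_squares matrix → Spec_valid_squares matrix (valid_squares matrix)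

-- ===== LEMMAS AND PROOFS =====

theorem sl03 {α : Type} (row : List α) : PySem.List.slice row (some (0:Int)) (some 3) = row.take 3 := by
  rw [PySem.List.slice_toNat row (by norm_num) (by norm_num)]; simp

theorem sl36 {α : Type} (row : List α) : PySem.List.slice row (some (3:Int)) (some 6) = (row.drop 3).take 3 := by
  rw [PySem.List.slice_toNat row (by norm_num) (by norm_num)]; simp

theorem sl69 {α : Type} (row : List α) : PySem.List.slice row (some (6:Int)) (some 9) = (row.drop 6).take 3 := by
  rw [PySem.List.slice_toNat row (by norm_num) (by norm_num)]; simp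

theorem sl9 {α : Type} (xs : List α) : PySem.List.slice xs none (some (9:Int)) = xs.take 9 := by
  rw [PySem.List.slice_to xs (by norm_num)]; simp

-- A's three successive 3-row slices together traverse matrix.take 9
theorem take9 {α : Type} (xs : List α) :
    xs.take 3 ++ ((xs.drop 3).take 3 ++ (xs.drop 6).take 3) = xs.take 9 := by
  rw [show (9:Nat) = 3 + 6 from rfl, List.take_add, show (6:Nat) = 3 + 3 from rfl, List.take_add,
      List.drop_drop]

-- the components of A's triple fold are the three per-band sums
theorem comp (rows : List (List Int)) (s1 s2 s3 : Int) :
    rows.foldl (fun (s : Int × Int × Int) row =>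
        (s.1 + (row.take 3).sum, s.2.1 + ((row.drop 3).take 3).sum,
         s.2.2 + ((row.drop 6).take 3).sum)) (s1, s2, s3) =
      (s1 + (rows.map (fun row => (row.take 3).sum)).sum,
       s2 + (rows.map (fun row => ((row.drop 3).take 3).sum)).sum,
       s3 + (rows.map (fun row => ((row.drop 6).take 3).sum)).sum) := by
  induction rows generalizing s1 s2 s3 with
  | nil => simp
  | cons r rs ih => simp only [List.foldl_cons, List.map_cons, List.sum_cons, ih]; ring_nf

-- the boolean shapes of A's final test and B's all-chain agree
theorem if_bands (a b c : Int) :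
    (if a ≠ 135 ∨ b ≠ 135 ∨ c ≠ 135 then false else true) =
      ((a == 135) && ((b == 135) && ((c == 135) && true))) := by
  by_cases ha : a = 135 <;> by_cases hb : b = 135 <;> by_cases hc : c = 135 <;> simp [ha, hb, hc]

theorem ab_eq (matrix : List (List Int)) :
    valid_squares matrix = valid_squares_alt matrix := by
  unfold valid_squares valid_squares_alt
  rw [show PySem.List.pyRange 0 7 3 = [0, 3, 6] from by decide,
      show PySem.List.pyRange 0 3 1 = [0, 1, 2] from by decide]
  simp only [List.foldl_cons, List.foldl_nil, List.all_cons, List.all_nil,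
    show (0:Int) + 3 = 3 from rfl, show (3:Int) + 3 = 6 from rfl, show (6:Int) + 3 = 9 from rfl,
    show (3:Int) * 0 = 0 from rfl, show (3:Int) * 1 = 3 from rfl, show (3:Int) * 2 = 6 from rfl,
    sl9, sl03, sl36, sl69]
  simp only [← List.foldl_append, List.append_assoc, take9]
  simp only [comp, zero_add]
  exact if_bands _ _ _

-- ===== VERDICT (by name: the statement is the Claim_ definition above) =====
theorem valid_squares_spec : Claim_equal_valid_squares := by
  intro matrix _
  exact ab_eq matrix
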